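-- pv_equiv track=rewrite | github.com/alexandraback/datacollection | solutions_5634697451274240_1/Python/p91paul/2016B.py | solve
-- ===== SOURCE A (Python) =====
-- def solve(s):
--     cur = '+'
--     flips = 0
--     for p in reversed(s):
--         if p != cur:
--             flips+=1
--             cur = p
--     return flips
-- ===== SOURCE B (Python) =====
-- def _trans(t):
--     # number of adjacent unequal pairs in t, by divide and conquer
--     if len(t) < 2:
--         return 0
--     if len(t) == 2:
--         return 1 if t[0] != t[1] else 0
--     m = len(t) // 2
--     return _trans(t[:m + 1]) + _trans(t[m:])
--
-- def solve(s):
--     # flips over reversed(s) starting from '+' = transitions in s + '+'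
--     # (transition count is reversal-invariant)
--     return _trans(s + '+')
-- ===== Notes on version B (the rewrite author's own statement) =====
-- stated objective: alternative
-- what changed: Replaced the stateful walk over reversed(s) by appending a '+' sentinel and counting adjacent unequal pairs with a divide-and-conquer recursion that splits the string in overlapping halves (no state machine, no reversal).
import Mathlib
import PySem

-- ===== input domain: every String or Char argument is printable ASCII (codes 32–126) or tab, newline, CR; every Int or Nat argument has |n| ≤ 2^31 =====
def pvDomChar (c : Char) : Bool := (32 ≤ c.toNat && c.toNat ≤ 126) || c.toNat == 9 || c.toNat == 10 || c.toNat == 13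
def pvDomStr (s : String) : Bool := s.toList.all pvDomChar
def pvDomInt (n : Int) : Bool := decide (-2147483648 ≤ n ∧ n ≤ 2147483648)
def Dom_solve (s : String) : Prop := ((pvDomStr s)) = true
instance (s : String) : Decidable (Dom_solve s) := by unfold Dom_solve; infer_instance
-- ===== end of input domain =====

-- B appends a '+' sentinel and counts adjacent unequal pairs by divide-and-conquer
-- instead of A's stateful walk over reversed(s) (objective: alternative).

-- ===== PORT A =====
-- the for-loop over reversed(s) with state (cur, flips)
def solveLoop : List Char → Char → Int → Int
  | [], _, flips => flips
  | p :: rest, cur, flips =>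
      if p ≠ cur then solveLoop rest p (flips + 1) else solveLoop rest cur flips

def solve (s : String) : Int := solveLoop s.toList.reverse '+' 0

-- ===== PORT B =====
-- _trans: adjacent unequal pairs via divide and conquer with overlapping halves
def transDC (t : List Char) : Int :=
  if t.length < 2 then 0
  else if t.length = 2 then
    -- t[0] != t[1]; with length = 2 these are the head and the second element
    (if t.headI ≠ t.tail.headI then (1 : Int) else 0)
  else
    let m := t.length / 2
    transDC (t.take (m + 1)) + transDC (t.drop m)
termination_by t.length
decreasing_by
  · simp only [List.length_take]; omega
  · simp only [List.length_drop]; omega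

def solve_alt (s : String) : Int := transDC (s.toList ++ ['+'])

-- ===== PRECONDITION & SPEC =====
def Spec_solve (s : String) (out : Int) : Prop := out = solve_alt s
instance (s : String) (out : Int) : Decidable (Spec_solve s out) := by unfold Spec_solve; infer_instance

-- ===== CLAIM (what is proved, stated in full; the proofs are below) =====
def Claim_equal_solve : Prop := ∀ (s : String), Dom_solve s → Spec_solve s (solve s)

-- ===== LEMMAS AND PROOFS =====

-- number of adjacent transitions in a list (proof-side characterisation)
def transCount : List Char → Int
  | a :: b :: t => (if a ≠ b then 1 else 0) + transCount (b :: t)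
  | _ => 0

theorem solveLoop_eq (l : List Char) : ∀ (cur : Char) (flips : Int),
    solveLoop l cur flips = flips + transCount (cur :: l) := by
  induction l with
  | nil => intro cur flips; simp [solveLoop, transCount]
  | cons p rest ih =>
    intro cur flips
    by_cases h : p = cur
    · subst h; simp [solveLoop, transCount, ih]
    · simp [solveLoop, h, ih, transCount]
      rw [if_neg (fun hc => h hc.symm)]
      ring

theorem transCount_append_singleton (xs : List Char) (a : Char) :
    transCount (xs ++ [a]) = transCount xs +
      (match xs.getLast? with
       | some c => if c ≠ a then (1 : Int) else 0
       | none => 0) := by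
  induction xs with
  | nil => simp [transCount]
  | cons b t ih =>
    cases t with
    | nil => simp [transCount]
    | cons c t' =>
      have h : (b :: c :: t') ++ [a] = b :: ((c :: t') ++ [a]) := by simp
      rw [h]
      show (if b ≠ c then (1:Int) else 0) + transCount ((c :: t') ++ [a]) = _
      rw [ih]
      simp [transCount]
      ring

theorem transCount_reverse (xs : List Char) : transCount xs.reverse = transCount xs := by
  induction xs with
  | nil => rfl
  | cons b t ih =>
    have h1 : (b :: t).reverse = t.reverse ++ [b] := by simp
    rw [h1, transCount_append_singleton, ih, List.getLast?_reverse]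
    cases t with
    | nil => simp [transCount]
    | cons c t' =>
      simp [transCount]
      by_cases hbc : b = c
      · simp [hbc]
      · rw [if_neg hbc, if_neg (fun hc => hbc hc.symm)]
        ring

-- overlapping split: transitions in xs ++ c :: ys decompose at c
theorem transCount_split (xs : List Char) (c : Char) (ys : List Char) :
    transCount (xs ++ c :: ys) = transCount (xs ++ [c]) + transCount (c :: ys) := by
  induction xs with
  | nil => simp [transCount]
  | cons a t ih =>
    cases t with
    | nil => simp [transCount]
    | cons b t' =>
      have h : ((a :: b :: t') ++ c :: ys) = a :: ((b :: t') ++ c :: ys) := by simp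
      rw [h]
      show (if a ≠ b then (1:Int) else 0) + transCount ((b :: t') ++ c :: ys) = _
      rw [ih]
      show _ = (if a ≠ b then (1:Int) else 0) + transCount ((b :: t') ++ [c]) + _
      ring

theorem transDC_eq_aux : ∀ (n : Nat) (t : List Char), t.length ≤ n → transDC t = transCount t := by
  intro n
  induction n with
  | zero =>
    intro t ht
    have ht0 : t = [] := by cases t <;> simp_all
    subst ht0; rw [transDC]; simp [transCount]
  | succ n ih =>
    intro t ht
    rw [transDC]
    by_cases h1 : t.length < 2
    · simp only [if_pos h1]
      cases t with
      | nil => simp [transCount]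
      | cons a t' =>
        cases t' with
        | nil => simp [transCount]
        | cons b t'' => simp at h1
    · by_cases h2 : t.length = 2
      · simp only [if_neg h1, if_pos h2]
        cases t with
        | nil => simp at h2
        | cons a t' =>
          cases t' with
          | nil => simp at h2
          | cons b t'' =>
            cases t'' with
            | nil => by_cases hab : a = b <;> simp [transCount, hab]
            | cons c t3 => simp at h2
      · simp only [if_neg h1, if_neg h2]
        have hn3 : 3 ≤ t.length := by omega
        have hm : t.length / 2 < t.length := by omega
        rw [ih (t.take (t.length / 2 + 1)) (by simp; omega),
            ih (t.drop (t.length / 2)) (by simp; omega)]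
        have hdrop : t.drop (t.length / 2) = t[t.length / 2] :: t.drop (t.length / 2 + 1) :=
          List.drop_eq_getElem_cons hm
        have htake : t.take (t.length / 2 + 1) = t.take (t.length / 2) ++ [t[t.length / 2]] :=
          List.take_succ_eq_append_getElem hm
        have hsplit : t = t.take (t.length / 2) ++ t[t.length / 2] :: t.drop (t.length / 2 + 1) := by
          conv_lhs => rw [← List.take_append_drop (t.length / 2) t]
          rw [hdrop]
        calc transCount (t.take (t.length / 2 + 1)) + transCount (t.drop (t.length / 2))
            = transCount (t.take (t.length / 2) ++ [t[t.length / 2]])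
              + transCount (t[t.length / 2] :: t.drop (t.length / 2 + 1)) := by
              rw [htake, hdrop]
          _ = transCount t := by rw [← transCount_split, ← hsplit]

theorem transDC_eq (t : List Char) : transDC t = transCount t :=
  transDC_eq_aux t.length t le_rfl

-- ===== VERDICT (by name: the statement is the Claim_ definition above) =====
theorem solve_spec : Claim_equal_solve := by
  intro s _
  unfold Spec_solve solve solve_alt
  rw [solveLoop_eq, transDC_eq]
  have h : ('+' :: s.toList.reverse) = (s.toList ++ ['+']).reverse := by simp
  rw [h, transCount_reverse, transCount_append_singleton]
  cases hc : s.toList.getLast? <;> simp
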